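-- pv_equiv track=rewrite | github.com/EgorPlehanov/DS-Benchmark | src/generators/dass_generator.py | _generate_all_subsets_safe
-- ===== SOURCE A (Python) =====
-- from typing import List, Dict, Any, Optional
--
-- def _generate_all_subsets_safe(elements: List[str], max_subsets: int = 100) -> List[set]:
--     """
--     Безопасная генерация подмножеств для маленьких фреймов
--     """
--     n = len(elements)
--     all_subsets = []
--
--     # Ограничиваем максимальное количество
--     max_possible = 1 << n
--     actual_max = min(max_possible, max_subsets)
--
--     # Генерируем подмножества до достижения лимита
--     for mask in range(1, max_possible):
--         if len(all_subsets) >= actual_max: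
--             break
--
--         subset = set()
--         for i in range(n):
--             if mask & (1 << i):
--                 subset.add(elements[i])
--         all_subsets.append(subset)
--
--     return all_subsets
-- ===== SOURCE B (Python) =====
-- from typing import List
--
--
-- def _generate_all_subsets_safe(elements: List[str], max_subsets: int = 100) -> List[set]:
--     """Incremental-doubling generation of the first nonempty subsets (bitmask order)."""
--     actual_max = min(1 << len(elements), max_subsets)
--     powerset = [()]
--     output = []
--     for e in elements:
--         for s in list(powerset):
--             if len(output) >= actual_max:
--                 return [set(t) for t in output]
--             new = s + (e,)
--             powerset.append(new)
--             output.append(new)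
--     return [set(t) for t in output]
-- ===== Notes on version B (the rewrite author's own statement) =====
-- stated objective: faster
-- what changed: Replaces integer-bitmask enumeration (an inner loop testing all n bit positions for every mask) by incremental powerset doubling: a growing snapshot list of already-built subsets is extended once per element, which reproduces bitmask order without any bit arithmetic.
import Mathlib
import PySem

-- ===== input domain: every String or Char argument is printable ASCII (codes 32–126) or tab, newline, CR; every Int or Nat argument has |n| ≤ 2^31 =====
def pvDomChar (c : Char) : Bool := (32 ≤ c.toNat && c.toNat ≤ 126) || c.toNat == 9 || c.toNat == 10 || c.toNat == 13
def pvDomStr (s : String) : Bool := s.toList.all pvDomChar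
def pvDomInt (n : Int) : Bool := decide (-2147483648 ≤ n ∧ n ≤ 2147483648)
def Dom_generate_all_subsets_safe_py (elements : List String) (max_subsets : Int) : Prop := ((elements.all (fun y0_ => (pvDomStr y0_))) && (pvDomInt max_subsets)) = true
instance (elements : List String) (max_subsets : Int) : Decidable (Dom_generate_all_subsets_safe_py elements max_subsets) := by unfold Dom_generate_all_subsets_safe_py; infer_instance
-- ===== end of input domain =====

-- B replaces bitmask enumeration by incremental powerset doubling (same outputs, same order); objective: faster (no per-subset scan over all n bit positions).

-- ===== PORT A =====
-- inner loop: "for i in range(n): if mask & (1 << i): subset.add(elements[i])".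
-- mask ≥ 1 and i ≥ 0 throughout, so 'mask & (1 << i)' is computed on .toNat (exact there);
-- elements[i] for i in range(n) is PySem.List.pyGetD (always in range here).
def subsetOfMaskA (elements : List String) (n : Nat) (mask : Int) : List String :=
  (PySem.List.pyRange 0 (n : Int) 1).foldl
    (fun subset i =>
      if mask.toNat &&& (1 <<< i.toNat) ≠ 0 then PySem.Set.add subset (PySem.List.pyGetD elements i "")
      else subset)
    []

def generate_all_subsets_safe_py (elements : List String) (max_subsets : Int) : List (List String) :=
  let n := elements.length
  let max_possible : Int := 2 ^ n              -- 1 << n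
  let actual_max : Int := min max_possible max_subsets
  -- 'break' once the cap is reached: every remaining iteration leaves the accumulator unchanged
  (PySem.List.pyRange 1 max_possible 1).foldl
    (fun all_subsets mask =>
      if (all_subsets.length : Int) ≥ actual_max then all_subsets
      else all_subsets ++ [subsetOfMaskA elements n mask])
    []

-- ===== PORT B =====
-- inner loop "for s in list(powerset): …" with an early "return output":
-- structural recursion over the snapshot, returning (powerset, output, returned?)
def innerLoopB (actual_max : Int) (e : String) :
    List (List String) → List (List String) → List (List String) →
    List (List String) × List (List String) × Bool
  | [], P, out => (P, out, false)
  | s :: rest, P, out =>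
      if (out.length : Int) ≥ actual_max then (P, out, true)
      else
        let nw := s ++ [e]                   -- new = s + (e,)
        innerLoopB actual_max e rest (P ++ [nw]) (out ++ [nw])

def outerLoopB (actual_max : Int) :
    List String → List (List String) → List (List String) → List (List String)
  | [], _, out => out.map PySem.Set.ofList                 -- [set(t) for t in output]
  | e :: es, P, out =>
      match innerLoopB actual_max e P P out with
      | (_, out', true) => out'.map PySem.Set.ofList       -- early return: [set(t) for t in output]
      | (P', out', false) => outerLoopB actual_max es P' out'

def generate_all_subsets_safe_py_alt (elements : List String) (max_subsets : Int) : List (List String) :=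
  outerLoopB (min ((2 : Int) ^ elements.length) max_subsets) elements [[]] []

-- ===== PRECONDITION & SPEC =====
def Spec_generate_all_subsets_safe_py (elements : List String) (max_subsets : Int) (out : List (List String)) : Prop := out = generate_all_subsets_safe_py_alt elements max_subsets
instance (elements : List String) (max_subsets : Int) (out : List (List String)) : Decidable (Spec_generate_all_subsets_safe_py elements max_subsets out) := by unfold Spec_generate_all_subsets_safe_py; infer_instance

-- ===== CLAIM (what is proved, stated in full; the proofs are below) =====
def Claim_equal_generate_all_subsets_safe_py : Prop := ∀ (elements : List String) (max_subsets : Int), Dom_generate_all_subsets_safe_py elements max_subsets → Spec_generate_all_subsets_safe_py elements max_subsets (generate_all_subsets_safe_py elements max_subsets)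

-- ===== LEMMAS AND PROOFS =====

-- Common reference object: the powerset of `es` grown from `P` by doubling, in bitmask order.
def stepD (P : List (List String)) (e : String) : List (List String) :=
  P ++ P.map (fun s => s ++ [e])

def fullFrom (P : List (List String)) (es : List String) : List (List String) :=
  es.foldl stepD P

-- Nat-level raw (duplicate-keeping) version of A's inner loop: the insertion sequence of mask m.
def rawN (l : List String) (m : Nat) : List String :=
  (List.range l.length).foldl
    (fun s i => if m &&& (1 <<< i) ≠ 0 then s ++ [l.getD i ""] else s) []

lemma fullFrom_prefix (es : List String) : ∀ P, P <+: fullFrom P es := by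
  induction es with
  | nil => intro P; exact List.prefix_refl P
  | cons e es ih =>
      intro P
      exact (List.prefix_append P _).trans (ih (stepD P e))


-- Nat bit facts used to split the mask fold at the top bit.
lemma bit_lt (m n : Nat) (h : m < 2 ^ n) : m &&& (1 <<< n) = 0 := by
  rw [Nat.one_shiftLeft, Nat.and_two_pow, Nat.testBit_lt_two_pow h]; simp

lemma bit_mid (r n i : Nat) (hr : r < 2 ^ n) (hi : i < n) :
    (2 ^ n + r) &&& (1 <<< i) = r &&& (1 <<< i) := by
  rw [Nat.one_shiftLeft, Nat.and_two_pow, Nat.and_two_pow]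
  have h1 := Nat.testBit_mod_two_pow (2 ^ n + r) n i
  rw [Nat.add_mod_left, Nat.mod_eq_of_lt hr] at h1
  rw [h1]; simp [hi]

lemma bit_top (r n : Nat) (hr : r < 2 ^ n) : (2 ^ n + r) &&& (1 <<< n) ≠ 0 := by
  have hp : 0 < 2 ^ n := Nat.two_pow_pos n
  rw [Nat.one_shiftLeft, Nat.and_two_pow]
  have h2 : (2 ^ n + r).testBit n = true := by
    rw [Nat.testBit_eq_decide_div_mod_eq, Nat.add_comm, Nat.add_div_right _ hp,
      Nat.div_eq_of_lt hr]
    decide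
  rw [h2]; simp

lemma rawN_append_lt (l : List String) (e : String) (m : Nat) (h : m < 2 ^ l.length) :
    rawN (l ++ [e]) m = rawN l m := by
  unfold rawN
  rw [List.length_append, List.length_singleton, List.range_succ, List.foldl_append]
  simp only [List.foldl_cons, List.foldl_nil, bit_lt m l.length h, ne_eq, not_true_eq_false,
    if_false]
  exact PySem.List.foldl_congr_mem _ _ _ _ (by
    intro acc x hx
    have hx' : x < l.length := List.mem_range.mp hx
    rw [List.getD_append _ _ _ _ hx'])

lemma rawN_append_ge (l : List String) (e : String) (r : Nat) (h : r < 2 ^ l.length) :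
    rawN (l ++ [e]) (2 ^ l.length + r) = rawN l r ++ [e] := by
  unfold rawN
  rw [List.length_append, List.length_singleton, List.range_succ, List.foldl_append]
  simp only [List.foldl_cons, List.foldl_nil, if_pos (bit_top r l.length h)]
  rw [PySem.List.foldl_congr_mem _ _
    (fun s i => if r &&& (1 <<< i) ≠ 0 then s ++ [l.getD i ""] else s) _ (by
      intro acc x hx
      have hx' : x < l.length := List.mem_range.mp hx
      rw [bit_mid r l.length x h hx', List.getD_append _ _ _ _ hx'])]
  congr 1
  rw [List.getD_append_right _ _ _ _ (le_refl _)]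
  simp

lemma range_map_rawN (l : List String) :
    (List.range (2 ^ l.length)).map (rawN l) = fullFrom [[]] l := by
  induction l using List.reverseRecOn with
  | nil => rfl
  | append_singleton l e ih =>
      have hlen : (l ++ [e]).length = l.length + 1 := by simp
      have hfull : fullFrom [[]] (l ++ [e]) = stepD (fullFrom [[]] l) e := by
        unfold fullFrom
        rw [List.foldl_append]
        rfl
      rw [hlen, hfull, pow_succ, mul_two, List.range_add, List.map_append, List.map_map]
      unfold stepD
      congr 1
      · rw [← ih]
        apply List.map_congr_left
        intro m hm
        exact rawN_append_lt l e m (List.mem_range.mp hm)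
      · rw [← ih, List.map_map]
        apply List.map_congr_left
        intro r hr
        exact rawN_append_ge l e r (List.mem_range.mp hr)

-- A's set-building fold is the set() of its insertion sequence.
lemma foldl_add_eq_ofList (p : Nat → Prop) [DecidablePred p] (g : Nat → String) (L : List Nat) :
    L.foldl (fun s i => if p i then PySem.Set.add s (g i) else s) []
      = PySem.Set.ofList (L.foldl (fun r i => if p i then r ++ [g i] else r) []) := by
  have h1 : L.foldl (fun r i => if p i then r ++ [g i] else r) []
      = ([] : List String) ++ (L.filter (fun i => decide (p i))).map g := by
    rw [← PySem.List.foldl_append_if (fun i => decide (p i)) g L []]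
    simp
  rw [PySem.Set.ofList_eq_foldl, h1, List.nil_append, List.foldl_map, List.foldl_filter]
  simp

lemma subsetOfMaskA_natCast (l : List String) (m : Nat) :
    subsetOfMaskA l l.length (m : Int) = PySem.Set.ofList (rawN l m) := by
  unfold subsetOfMaskA rawN
  rw [PySem.List.pyRange_one, List.foldl_map]
  simp only [zero_add, sub_zero, Int.toNat_natCast, PySem.List.pyGetD_natCast]
  rw [foldl_add_eq_ofList (fun i => m &&& (1 <<< i) ≠ 0) (fun i => l.getD i "")]

lemma pyRange_map_subsetOf (l : List String) :
    (PySem.List.pyRange 1 ((2 : Int) ^ l.length) 1).map (fun mask => subsetOfMaskA l l.length mask)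
      = ((fullFrom [[]] l).drop 1).map PySem.Set.ofList := by
  have hcast : ((2 : Int) ^ l.length) = ((2 ^ l.length : Nat) : Int) := by push_cast; ring
  have hpos : 1 ≤ 2 ^ l.length := Nat.one_le_two_pow
  rw [PySem.List.pyRange_one, List.map_map]
  have h2 : (((2 : Int) ^ l.length) - 1).toNat = 2 ^ l.length - 1 := by omega
  rw [h2, ← range_map_rawN l]
  have h5 : ((List.range (2 ^ l.length)).map (rawN l)).drop 1
      = (List.range (2 ^ l.length - 1)).map (fun k => rawN l (k + 1)) := by
    conv_lhs => rw [show 2 ^ l.length = (2 ^ l.length - 1) + 1 by omega]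
    rw [List.range_succ_eq_map, List.map_cons, List.drop_one, List.tail_cons, List.map_map]
    rfl
  rw [h5, List.map_map]
  apply List.map_congr_left
  intro k _
  show subsetOfMaskA l l.length (1 + (k : Int)) = PySem.Set.ofList (rawN l (k + 1))
  rw [show (1 + (k : Int)) = ((k + 1 : Nat) : Int) by push_cast; ring, subsetOfMaskA_natCast]

lemma foldl_capped (f : Int → List String) (t : Nat) :
    ∀ (L : List Int) (acc : List (List String)),
      L.foldl (fun a m => if t ≤ a.length then a else a ++ [f m]) acc
        = acc ++ (L.map f).take (t - acc.length) := by
  intro L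
  induction L with
  | nil => intro acc; simp
  | cons m L ih =>
      intro acc
      rw [List.foldl_cons]
      by_cases h : t ≤ acc.length
      · rw [if_pos h, ih, show t - acc.length = 0 by omega]
        simp
      · rw [if_neg h, ih, List.map_cons,
          show t - acc.length = (t - (acc ++ [f m]).length) + 1 by simp; omega,
          List.take_succ_cons]
        simp

lemma portA_eq (elements : List String) (max_subsets : Int) :
    generate_all_subsets_safe_py elements max_subsets
      = (((fullFrom [[]] elements).drop 1).map PySem.Set.ofList).take
          (min ((2 : Int) ^ elements.length) max_subsets).toNat := by
  unfold generate_all_subsets_safe_py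
  dsimp only
  have hfun : (fun (a : List (List String)) (mask : Int) =>
        if (a.length : Int) ≥ min ((2 : Int) ^ elements.length) max_subsets then a
        else a ++ [subsetOfMaskA elements elements.length mask])
      = (fun a mask =>
        if (min ((2 : Int) ^ elements.length) max_subsets).toNat ≤ a.length then a
        else a ++ [subsetOfMaskA elements elements.length mask]) := by
    funext a mask
    apply if_congr _ rfl rfl
    omega
  rw [hfun, foldl_capped (subsetOfMaskA elements elements.length), pyRange_map_subsetOf]
  simp

lemma innerB_spec (am : Int) (e : String) :
    ∀ (S P out : List (List String)), out.length ≤ am.toNat →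
      ∃ flag,
        innerLoopB am e S P out
          = (P ++ (S.map (fun s => s ++ [e])).take (am.toNat - out.length),
             out ++ (S.map (fun s => s ++ [e])).take (am.toNat - out.length),
             flag)
        ∧ (flag = true →
            out.length + ((S.map (fun s => s ++ [e])).take (am.toNat - out.length)).length = am.toNat)
        ∧ (flag = false →
            (S.map (fun s => s ++ [e])).take (am.toNat - out.length)
              = S.map (fun s => s ++ [e])) := by
  intro S
  induction S with
  | nil =>
      intro P out h
      exact ⟨false, by simp [innerLoopB], by simp, by simp⟩
  | cons s rest ih =>
      intro P out h
      by_cases hc : am.toNat ≤ out.length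
      · have hc' : (out.length : Int) ≥ am := by omega
        refine ⟨true, ?_, ?_, ?_⟩
        · simp [innerLoopB, if_pos hc', show am.toNat - out.length = 0 by omega]
        · intro _
          simp [show am.toNat - out.length = 0 by omega]
          omega
        · intro hfalse
          exact absurd hfalse (by simp)
      · have hc' : ¬ ((out.length : Int) ≥ am) := by omega
        have hlen : (out ++ [s ++ [e]]).length ≤ am.toNat := by simp; omega
        obtain ⟨flag, h1, h2, h3⟩ :=
          ih (P ++ [s ++ [e]]) (out ++ [s ++ [e]]) hlen
        have htake : ((s :: rest).map (fun s => s ++ [e])).take (am.toNat - out.length)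
            = (s ++ [e])
              :: (rest.map (fun s => s ++ [e])).take
                  (am.toNat - (out ++ [s ++ [e]]).length) := by
          rw [List.map_cons,
            show am.toNat - out.length = (am.toNat - (out ++ [s ++ [e]]).length) + 1
              by simp; omega, List.take_succ_cons]
        refine ⟨flag, ?_, ?_, ?_⟩
        · simp only [innerLoopB, if_neg hc']
          rw [h1, htake]
          simp
        · intro hf
          have := h2 hf
          rw [htake]
          simp only [List.length_cons]
          simp at this ⊢
          omega
        · intro hf
          rw [htake, h3 hf, List.map_cons]

lemma outerB_spec (am : Int) :
    ∀ (es : List String) (out : List (List String)), out.length ≤ am.toNat →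
      outerLoopB am es ([] :: out) out
        = (((fullFrom ([] :: out) es).drop 1).take am.toNat).map PySem.Set.ofList := by
  intro es
  induction es with
  | nil =>
      intro out h
      simp only [outerLoopB, fullFrom, List.foldl_nil, List.drop_one, List.tail_cons]
      rw [List.take_of_length_le h]
  | cons e es ih =>
      intro out h
      obtain ⟨flag, h1, h2, h3⟩ := innerB_spec am e ([] :: out) ([] :: out) out h
      have hstep : fullFrom ([] :: out) (e :: es) = fullFrom (stepD ([] :: out) e) es := rfl
      cases flag with
      | true =>
          simp only [outerLoopB]
          rw [h1]
          dsimp only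
          refine congrArg (List.map PySem.Set.ofList) ?_
          have happ := h2 rfl
          obtain ⟨ext, hext⟩ := fullFrom_prefix es (stepD ([] :: out) e)
          rw [hstep, ← hext]
          have hM : stepD ([] :: out) e ++ ext
              = [] :: (out ++ ((([] :: out).map (fun s => s ++ [e])) ++ ext)) := by
            unfold stepD
            simp
          rw [hM, List.drop_one, List.tail_cons, List.take_append]
          have hlenapp : ((([] :: out).map (fun s => s ++ [e])).take
              (am.toNat - out.length)).length = am.toNat - out.length := by omega
          have hd : am.toNat - out.length ≤ (([] :: out).map (fun s => s ++ [e])).length := by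
            rw [List.length_take] at hlenapp
            omega
          rw [List.take_of_length_le (by omega : out.length ≤ am.toNat),
            List.take_append_of_le_length hd]
      | false =>
          simp only [outerLoopB]
          rw [h1]
          dsimp only
          have happ := h3 rfl
          have hP' : ([] :: out) ++ (([] :: out).map (fun s => s ++ [e])).take
              (am.toNat - out.length)
              = [] :: (out ++ (([] :: out).map (fun s => s ++ [e])).take
                  (am.toNat - out.length)) := by simp
          have hlen' : (out ++ (([] :: out).map (fun s => s ++ [e])).take
              (am.toNat - out.length)).length ≤ am.toNat := by
            rw [List.length_append, List.length_take]
            omega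
          rw [hP', ih _ hlen', hstep,
            show ([] : List String) :: (out ++ (([] :: out).map (fun s => s ++ [e])).take
                (am.toNat - out.length)) = stepD ([] :: out) e from by
              unfold stepD; rw [happ]; simp]

-- ===== VERDICT (by name: the statement is the Claim_ definition above) =====
theorem generate_all_subsets_safe_py_spec : Claim_equal_generate_all_subsets_safe_py := by
  intro elements max_subsets _
  show _ = _
  rw [portA_eq]
  unfold generate_all_subsets_safe_py_alt
  rw [outerB_spec _ elements [] (by simp), List.map_take]
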